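-- pv_equiv track=rewrite | github.com/AidenNovak/autosedance | src/autosedance/utils/canon.py | extract_marker_line
-- ===== SOURCE A (Python) =====
-- from typing import List, Optional
--
-- def extract_marker_line(text: str, marker: str) -> Optional[str]:
--     """Extract a single-line payload that starts with `marker`.
--
--     Example line:
--         [[CANON_SUMMARY]] Ending frame... MUSIC: ...
--     """
--     raw = (text or "").strip()
--     marker = (marker or "").strip()
--     if not raw or not marker:
--         return None
--
--     # First pass: strict line-start match.
--     for line in raw.splitlines():
--         l = (line or "").strip()
--         if not l:
--             continue
--         if l.startswith(marker):
--             out = l[len(marker) :].strip()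
--             if out.startswith(":"):
--                 out = out[1:].strip()
--             return out or None
--
--     # Second pass: tolerate a bullet prefix like "- [[CANON_SUMMARY]] ...".
--     for line in raw.splitlines():
--         l = (line or "").strip()
--         if not l:
--             continue
--         pos = l.find(marker)
--         if pos < 0:
--             continue
--         out = l[pos + len(marker) :].strip()
--         if out.startswith(":"):
--             out = out[1:].strip()
--         return out or None
--     return None
-- ===== SOURCE B (Python) =====
-- from typing import Optional
--
-- def _payload(l: str, k: int) -> Optional[str]:
--     out = l[k:].strip()
--     if out.startswith(":"):
--         out = out[1:].strip()
--     return out or None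
--
-- def extract_marker_line(text: str, marker: str) -> Optional[str]:
--     """Single pass: return immediately on a strict line-start match; remember
--     the first line merely containing the marker as a fallback."""
--     raw = (text or "").strip()
--     marker = (marker or "").strip()
--     if not raw or not marker:
--         return None
--     have_fallback = False
--     fallback = None
--     for line in raw.splitlines():
--         l = line.strip()
--         if not l:
--             continue
--         if l.startswith(marker):
--             return _payload(l, len(marker))
--         if not have_fallback and marker in l:
--             have_fallback = True
--             fallback = _payload(l, l.find(marker) + len(marker))
--     return fallback
-- ===== Notes on version B (the rewrite author's own statement) =====
-- stated objective: simpler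
-- what changed: A's two full scans over the lines (strict start-match pass, then a contains-match pass) are fused into one loop that returns immediately on a start match and records the first containing line as a fallback.
import Mathlib
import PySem

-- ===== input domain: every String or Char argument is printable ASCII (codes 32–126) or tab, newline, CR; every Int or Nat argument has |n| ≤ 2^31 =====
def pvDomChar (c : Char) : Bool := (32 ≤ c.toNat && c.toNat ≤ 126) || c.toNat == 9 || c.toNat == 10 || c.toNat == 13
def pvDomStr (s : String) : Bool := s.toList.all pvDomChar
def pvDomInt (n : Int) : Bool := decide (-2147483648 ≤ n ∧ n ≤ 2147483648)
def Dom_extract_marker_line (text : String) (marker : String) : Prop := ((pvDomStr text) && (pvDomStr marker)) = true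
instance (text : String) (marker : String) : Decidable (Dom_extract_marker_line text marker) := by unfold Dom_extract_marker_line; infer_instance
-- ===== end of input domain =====

-- B replaces A's two full scans by one loop with a recorded fallback (objective: simpler single pass).

-- ===== PORT A =====
-- shared payload step: out = l[k:].strip(); if out.startswith(":"): out = out[1:].strip(); return out or None
-- (identical code block in A's two passes and in B's _payload helper; k ≥ 0, so the Python slice l[k:] is List.drop)
def emlOut (l : List Char) (k : Nat) : Option String :=
  let out := PySem.Chars.strip (l.drop k)
  let out := if PySem.Chars.startswith out [':'] then PySem.Chars.strip (out.drop 1) else out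
  if out = [] then none else some (String.ofList out)

-- A's first pass: strict line-start match; 'some r' = the pass executed 'return r'
def emlPass1 (lines : List (List Char)) (m : List Char) : Option (Option String) :=
  match lines with
  | [] => none
  | line :: rest =>
    let l := PySem.Chars.strip line
    if l = [] then emlPass1 rest m
    else if PySem.Chars.startswith l m then some (emlOut l m.length)
    else emlPass1 rest m

-- A's second pass: first line containing the marker
def emlPass2 (lines : List (List Char)) (m : List Char) : Option (Option String) :=
  match lines with
  | [] => none
  | line :: rest =>
    let l := PySem.Chars.strip line
    if l = [] then emlPass2 rest m
    else
      let pos := PySem.Chars.find l m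
      if pos < 0 then emlPass2 rest m
      else some (emlOut l (pos.toNat + m.length))

def extract_marker_line (text : String) (marker : String) : Option String :=
  let raw := PySem.Chars.strip text.toList
  let m := PySem.Chars.strip marker.toList
  if raw = [] ∨ m = [] then none
  else
    let lines := PySem.Chars.splitlines raw
    match emlPass1 lines m with
    | some r => r
    | none =>
      match emlPass2 lines m with
      | some r => r
      | none => none

-- ===== PORT B =====
-- B's single loop: return immediately on a start match, else record the first containing line
def emlLoop (lines : List (List Char)) (m : List Char)
    (haveFb : Bool) (fb : Option String) : Option String :=
  match lines with
  | [] => fb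
  | line :: rest =>
    let l := PySem.Chars.strip line
    if l = [] then emlLoop rest m haveFb fb
    else if PySem.Chars.startswith l m then emlOut l m.length
    else if haveFb = false ∧ PySem.Chars.isIn m l = true then
      emlLoop rest m true (emlOut l ((PySem.Chars.find l m).toNat + m.length))
    else emlLoop rest m haveFb fb

def extract_marker_line_alt (text : String) (marker : String) : Option String :=
  let raw := PySem.Chars.strip text.toList
  let m := PySem.Chars.strip marker.toList
  if raw = [] ∨ m = [] then none
  else emlLoop (PySem.Chars.splitlines raw) m false none

-- ===== PRECONDITION & SPEC =====
def Spec_extract_marker_line (text : String) (marker : String) (out : Option String) : Prop := out = extract_marker_line_alt text marker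
instance (text : String) (marker : String) (out : Option String) : Decidable (Spec_extract_marker_line text marker out) := by unfold Spec_extract_marker_line; infer_instance

-- ===== CLAIM (what is proved, stated in full; the proofs are below) =====
def Claim_equal_extract_marker_line : Prop := ∀ (text : String) (marker : String), Dom_extract_marker_line text marker → Spec_extract_marker_line text marker (extract_marker_line text marker)

-- ===== LEMMAS AND PROOFS =====

-- once the fallback is recorded, B's loop is A's first pass with default fb
lemma emlLoop_true (lines : List (List Char)) (m : List Char) (fb : Option String) :
    emlLoop lines m true fb = (emlPass1 lines m).getD fb := by
  induction lines with
  | nil => simp [emlLoop, emlPass1]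
  | cons line rest ih =>
    simp only [emlLoop, emlPass1]
    split_ifs <;> simp_all

-- 'marker in l' agrees with 'l.find(marker) ≥ 0'
lemma isIn_iff_find_nonneg (m l : List Char) :
    PySem.Chars.isIn m l = true ↔ ¬ PySem.Chars.find l m < 0 := by
  rw [PySem.Chars.isIn_iff_infix, ← PySem.Chars.find_nonneg_iff]
  omega

-- B's loop from the initial state = A's two passes in sequence
lemma emlLoop_false (lines : List (List Char)) (m : List Char) :
    emlLoop lines m false none =
      match emlPass1 lines m with
      | some r => r
      | none => (emlPass2 lines m).getD none := by
  induction lines with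
  | nil => simp [emlLoop, emlPass1, emlPass2]
  | cons line rest ih =>
    simp only [emlLoop, emlPass1, emlPass2]
    by_cases h0 : PySem.Chars.strip line = []
    · simp [h0, ih]
    · by_cases h1 : PySem.Chars.startswith (PySem.Chars.strip line) m = true
      · simp [h0, h1]
      · by_cases h2 : PySem.Chars.find (PySem.Chars.strip line) m < 0
        · have : ¬ PySem.Chars.isIn m (PySem.Chars.strip line) = true := by
            rw [isIn_iff_find_nonneg]; omega
          simp [h0, h1, h2, this, ih]
        · have : PySem.Chars.isIn m (PySem.Chars.strip line) = true := by
            rw [isIn_iff_find_nonneg]; omega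
          simp [h0, h1, h2, this, emlLoop_true]
          cases emlPass1 rest m <;> simp

-- ===== VERDICT (by name: the statement is the Claim_ definition above) =====
theorem extract_marker_line_spec : Claim_equal_extract_marker_line := by
  intro text marker _
  unfold Spec_extract_marker_line extract_marker_line extract_marker_line_alt
  simp only []
  split_ifs with h
  · rfl
  · rw [emlLoop_false]
    cases emlPass1 (PySem.Chars.splitlines (PySem.Chars.strip text.toList))
        (PySem.Chars.strip marker.toList) <;>
      cases emlPass2 (PySem.Chars.splitlines (PySem.Chars.strip text.toList))
        (PySem.Chars.strip marker.toList) <;> rfl
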